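-- pv_equiv track=rewrite | github.com/loveg750/Umbra | engine/persona_middleware.py | _tag_flavor_line
-- ===== SOURCE A (Python) =====
-- from typing import Any, Dict, List
--
-- def _tag_flavor_line(tags: List[str]) -> str:
--     tags = [t.lower() for t in (tags or [])]
--
--     if "zero_day_suspect" in tags:
--         return "This pattern does not exist in my memory. Treat it as a potential zero-day."
--
--     if "exfil_suspect" in tags:
--         return "Data is trying to leave the environment. Quietly. That is rarely innocent."
--
--     if "c2_suspect" in tags:
--         return "Command-and-control style communication detected between this host and an external endpoint."
--
--     if "credential_access" in tags:
--         return "Credential surfaces are under pressure. If they obtain keys, everything downstream falls."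
--
--     if "behavior_deviation" in tags:
--         return "The entity’s behavior has shifted away from its baseline. That is where attackers hide."
--
--     if "insider_risk" in tags:
--         return "Context suggests elevated insider risk for this operator."
--
--     return ""
-- ===== SOURCE B (Python) =====
-- from typing import Any, Dict, List
--
-- _PRIORITY = {
--     "zero_day_suspect": (0, "This pattern does not exist in my memory. Treat it as a potential zero-day."),
--     "exfil_suspect": (1, "Data is trying to leave the environment. Quietly. That is rarely innocent."),
--     "c2_suspect": (2, "Command-and-control style communication detected between this host and an external endpoint."),
--     "credential_access": (3, "Credential surfaces are under pressure. If they obtain keys, everything downstream falls."),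
--     "behavior_deviation": (4, "The entity\u2019s behavior has shifted away from its baseline. That is where attackers hide."),
--     "insider_risk": (5, "Context suggests elevated insider risk for this operator."),
-- }
--
-- def _tag_flavor_line(tags):
--     cands = [_PRIORITY[u] for u in (t.lower() for t in (tags or [])) if u in _PRIORITY]
--     return min(cands)[1] if cands else ""
-- ===== Notes on version B (the rewrite author's own statement) =====
-- stated objective: idiomatic
-- what changed: Replaces the fixed chain of six list-membership tests with a data-driven single scan of the input tags against a priority table, returning the message of the minimum-rank match via min().
import Mathlib
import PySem

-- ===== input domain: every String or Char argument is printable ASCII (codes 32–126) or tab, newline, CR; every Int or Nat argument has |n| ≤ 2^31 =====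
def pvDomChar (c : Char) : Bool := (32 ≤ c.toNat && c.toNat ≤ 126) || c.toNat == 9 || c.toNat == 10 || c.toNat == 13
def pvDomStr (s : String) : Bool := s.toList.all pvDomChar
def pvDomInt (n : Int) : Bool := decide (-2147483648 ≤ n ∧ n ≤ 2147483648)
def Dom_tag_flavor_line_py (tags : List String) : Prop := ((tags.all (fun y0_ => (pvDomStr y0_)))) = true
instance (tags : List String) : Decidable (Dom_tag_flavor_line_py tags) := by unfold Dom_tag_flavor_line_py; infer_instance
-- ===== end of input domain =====

-- B replaces A's fixed chain of six membership tests by one scan of the tags against a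
-- priority table, returning the message of the minimum-rank match (idiomatic, data-driven).

-- ===== PORT A =====
def tag_flavor_line_py (tags : List String) : String :=
  let tags := tags.map PySem.Str.lower
  if tags.contains "zero_day_suspect" then
    "This pattern does not exist in my memory. Treat it as a potential zero-day."
  else if tags.contains "exfil_suspect" then
    "Data is trying to leave the environment. Quietly. That is rarely innocent."
  else if tags.contains "c2_suspect" then
    "Command-and-control style communication detected between this host and an external endpoint."
  else if tags.contains "credential_access" then
    "Credential surfaces are under pressure. If they obtain keys, everything downstream falls."
  else if tags.contains "behavior_deviation" then
    "The entity’s behavior has shifted away from its baseline. That is where attackers hide."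
  else if tags.contains "insider_risk" then
    "Context suggests elevated insider risk for this operator."
  else ""

-- ===== PORT B =====
-- the module-level _PRIORITY dict, as a lookup function (first-match association)
def pvPriority (t : String) : Option (Nat × String) :=
  if t = "zero_day_suspect" then
    some (0, "This pattern does not exist in my memory. Treat it as a potential zero-day.")
  else if t = "exfil_suspect" then
    some (1, "Data is trying to leave the environment. Quietly. That is rarely innocent.")
  else if t = "c2_suspect" then
    some (2, "Command-and-control style communication detected between this host and an external endpoint.")
  else if t = "credential_access" then
    some (3, "Credential surfaces are under pressure. If they obtain keys, everything downstream falls.")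
  else if t = "behavior_deviation" then
    some (4, "The entity’s behavior has shifted away from its baseline. That is where attackers hide.")
  else if t = "insider_risk" then
    some (5, "Context suggests elevated insider risk for this operator.")
  else none

-- Python's min on tuples: the new element replaces the best iff it is lexicographically smaller
def pvPickMin (q p : Nat × String) : Nat × String :=
  if p.1 < q.1 ∨ (p.1 = q.1 ∧ p.2 < q.2) then p else q

def tag_flavor_line_py_alt (tags : List String) : String :=
  let cands := (tags.map PySem.Str.lower).filterMap pvPriority
  match cands.foldl (fun acc p => match acc with
                      | none => some p
                      | some q => some (pvPickMin q p)) none with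
  | some p => p.2
  | none => ""

-- ===== PRECONDITION & SPEC =====
def Spec_tag_flavor_line_py (tags : List String) (out : String) : Prop := out = tag_flavor_line_py_alt tags
instance (tags : List String) (out : String) : Decidable (Spec_tag_flavor_line_py tags out) := by unfold Spec_tag_flavor_line_py; infer_instance

-- ===== CLAIM (what is proved, stated in full; the proofs are below) =====
def Claim_equal_tag_flavor_line_py : Prop := ∀ (tags : List String), Dom_tag_flavor_line_py tags → Spec_tag_flavor_line_py tags (tag_flavor_line_py tags)

-- ===== LEMMAS AND PROOFS =====

def pvMsg : Nat → String
  | 0 => "This pattern does not exist in my memory. Treat it as a potential zero-day."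
  | 1 => "Data is trying to leave the environment. Quietly. That is rarely innocent."
  | 2 => "Command-and-control style communication detected between this host and an external endpoint."
  | 3 => "Credential surfaces are under pressure. If they obtain keys, everything downstream falls."
  | 4 => "The entity’s behavior has shifted away from its baseline. That is where attackers hide."
  | 5 => "Context suggests elevated insider risk for this operator."
  | _ => ""

def pvRank (t : String) : Option Nat :=
  if t = "zero_day_suspect" then some 0
  else if t = "exfil_suspect" then some 1
  else if t = "c2_suspect" then some 2
  else if t = "credential_access" then some 3
  else if t = "behavior_deviation" then some 4
  else if t = "insider_risk" then some 5
  else none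

def pvOStep (a : Option Nat) (t : String) : Option Nat :=
  match pvRank t with
  | none => a
  | some i => match a with
    | none => some i
    | some j => some (if i < j then i else j)

def pvH (a : Option Nat) (L : List String) : Option Nat := L.foldl pvOStep a

def pvF (L : List String) : Option Nat :=
  if L.contains "zero_day_suspect" then some 0
  else if L.contains "exfil_suspect" then some 1
  else if L.contains "c2_suspect" then some 2
  else if L.contains "credential_access" then some 3
  else if L.contains "behavior_deviation" then some 4
  else if L.contains "insider_risk" then some 5
  else none

def pvOut : Option Nat → String
  | none => ""
  | some i => pvMsg i

theorem pvPriority_eq (t : String) : pvPriority t = (pvRank t).map (fun i => (i, pvMsg i)) := by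
  unfold pvPriority pvRank
  split_ifs <;> rfl

theorem pvPickMin_pair (i j : Nat) :
    pvPickMin (j, pvMsg j) (i, pvMsg i) = (if i < j then i else j, pvMsg (if i < j then i else j)) := by
  by_cases h : i < j
  · simp [pvPickMin, h]
  · by_cases e : i = j
    · subst e; simp [pvPickMin]
    · simp [pvPickMin, h, e]

theorem pvH_cons (a : Option Nat) (t : String) (L : List String) :
    pvH a (t :: L) = pvH (pvOStep a t) L := rfl

theorem pvFold_char (L : List String) (a : Option Nat) :
    (L.filterMap pvPriority).foldl
      (fun acc p => match acc with
        | none => some p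
        | some q => some (pvPickMin q p)) (a.map (fun i => (i, pvMsg i)))
    = (pvH a L).map (fun i => (i, pvMsg i)) := by
  induction L generalizing a with
  | nil => rfl
  | cons t L ih =>
    rw [List.filterMap_cons, pvH_cons]
    cases hr : pvRank t with
    | none =>
      have hp : pvPriority t = none := by rw [pvPriority_eq, hr]; rfl
      rw [hp]
      simp only [pvOStep, hr]
      exact ih a
    | some i =>
      have hp : pvPriority t = some (i, pvMsg i) := by rw [pvPriority_eq, hr]; rfl
      rw [hp]
      simp only [pvOStep, hr]
      cases a with
      | none =>
        have := ih (some i)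
        simpa using this
      | some j =>
        rw [List.foldl_cons]
        have := ih (some (if i < j then i else j))
        simpa [pvPickMin_pair] using this

theorem pvH_some (L : List String) (i : Nat) :
    pvH (some i) L = some (match pvH none L with
      | none => i
      | some j => Nat.min i j) := by
  induction L generalizing i with
  | nil => rfl
  | cons t L ih =>
    rw [pvH_cons, pvH_cons]
    cases hr : pvRank t with
    | none =>
      simp only [pvOStep, hr]
      exact ih i
    | some k =>
      simp only [pvOStep, hr]
      rw [ih (if k < i then k else i), ih k]
      cases h : pvH none L with
      | none => simp only [Option.some.injEq, Nat.min_def]; split_ifs <;> omega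
      | some m => simp only [Option.some.injEq, Nat.min_def]; split_ifs <;> omega

theorem pvF_eq_H (L : List String) : pvF L = pvH none L := by
  induction L with
  | nil => rfl
  | cons t L ih =>
    have hne : ∀ s : String, t ≠ s → (t :: L).contains s = L.contains s := by
      intro s hs; simp [Ne.symm hs]
    have hhd : ∀ s : String, t = s → (t :: L).contains s = true := by
      intro s hs; subst hs; simp
    rw [pvH_cons]
    cases hr : pvRank t with
    | none =>
      have hr2 := hr
      unfold pvRank at hr2
      split_ifs at hr2 with h0 h1 h2 h3 h4 h5
      simp only [pvOStep, hr]
      rw [← ih]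
      conv_lhs => unfold pvF
      conv_rhs => unfold pvF
      rw [hne _ h0, hne _ h1, hne _ h2, hne _ h3, hne _ h4, hne _ h5]
    | some k =>
      simp only [pvOStep, hr]
      rw [pvH_some, ← ih]
      have hr2 := hr
      unfold pvRank at hr2
      split_ifs at hr2 with h0 h1 h2 h3 h4 h5
      · injection hr2 with hk; subst hk; subst h0
        conv_lhs => unfold pvF
        conv_rhs => unfold pvF
        rw [hhd "zero_day_suspect" rfl, hne "exfil_suspect" (by decide), hne "c2_suspect" (by decide),
            hne "credential_access" (by decide), hne "behavior_deviation" (by decide), hne "insider_risk" (by decide)]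
        simp only [if_true]
        split_ifs <;> rfl
      · injection hr2 with hk; subst hk; subst h1
        conv_lhs => unfold pvF
        conv_rhs => unfold pvF
        rw [hne "zero_day_suspect" (by decide), hhd "exfil_suspect" rfl, hne "c2_suspect" (by decide),
            hne "credential_access" (by decide), hne "behavior_deviation" (by decide), hne "insider_risk" (by decide)]
        simp only [if_true]
        split_ifs <;> rfl
      · injection hr2 with hk; subst hk; subst h2
        conv_lhs => unfold pvF
        conv_rhs => unfold pvF
        rw [hne "zero_day_suspect" (by decide), hne "exfil_suspect" (by decide), hhd "c2_suspect" rfl,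
            hne "credential_access" (by decide), hne "behavior_deviation" (by decide), hne "insider_risk" (by decide)]
        simp only [if_true]
        split_ifs <;> rfl
      · injection hr2 with hk; subst hk; subst h3
        conv_lhs => unfold pvF
        conv_rhs => unfold pvF
        rw [hne "zero_day_suspect" (by decide), hne "exfil_suspect" (by decide), hne "c2_suspect" (by decide),
            hhd "credential_access" rfl, hne "behavior_deviation" (by decide), hne "insider_risk" (by decide)]
        simp only [if_true]
        split_ifs <;> rfl
      · injection hr2 with hk; subst hk; subst h4
        conv_lhs => unfold pvF
        conv_rhs => unfold pvF
        rw [hne "zero_day_suspect" (by decide), hne "exfil_suspect" (by decide), hne "c2_suspect" (by decide),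
            hne "credential_access" (by decide), hhd "behavior_deviation" rfl, hne "insider_risk" (by decide)]
        simp only [if_true]
        split_ifs <;> rfl
      · injection hr2 with hk; subst hk; subst h5
        conv_lhs => unfold pvF
        conv_rhs => unfold pvF
        rw [hne "zero_day_suspect" (by decide), hne "exfil_suspect" (by decide), hne "c2_suspect" (by decide),
            hne "credential_access" (by decide), hne "behavior_deviation" (by decide), hhd "insider_risk" rfl]
        simp only [if_true]
        split_ifs <;> rfl

theorem A_char (tags : List String) :
    tag_flavor_line_py tags = pvOut (pvF (tags.map PySem.Str.lower)) := by
  simp only [tag_flavor_line_py, pvF]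
  split_ifs <;> rfl

theorem B_char (tags : List String) :
    tag_flavor_line_py_alt tags = pvOut (pvH none (tags.map PySem.Str.lower)) := by
  simp only [tag_flavor_line_py_alt]
  have h := pvFold_char (tags.map PySem.Str.lower) none
  simp only [Option.map_none] at h
  rw [h]
  cases pvH none (tags.map PySem.Str.lower) <;> rfl

-- ===== VERDICT (by name: the statement is the Claim_ definition above) =====
theorem tag_flavor_line_py_spec : Claim_equal_tag_flavor_line_py := by
  intro tags _
  unfold Spec_tag_flavor_line_py
  rw [A_char, B_char, pvF_eq_H]
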